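-- pv_equiv track=rewrite | github.com/nghiatt90/cs-practice | codelearn/reverseinverse.py | reverseInverse
-- ===== SOURCE A (Python) =====
-- def reverseInverse(s):
--     words = []
--     current = ''
--     for c in s:
--         if not c.isalnum():
--             if current:
--                 words.append(current)
--                 current = ''
--             words.append(c)
--         else:
--             current += c
--     if current:
--         words.append(current)
--
--     def reverse_word(word):
--         if len(word) == 1 and not word.isalnum():
--             return word
--         out_rev = []
--         for i, c in enumerate(word[::-1]):
--             if word[i].isupper() or word[i].isnumeric():
--                 out_rev.append(c.lower())
--             else:
--                 out_rev.append(c.upper())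
--         return ''.join(out_rev)
--
--     return ''.join(reverse_word(word) for word in words)
-- ===== SOURCE B (Python) =====
-- def reverseInverse(s):
--     out = []
--     rest = s
--     while rest:
--         if rest[0].isalnum():
--             k = 0
--             while k < len(rest) and rest[k].isalnum():
--                 k += 1
--             run = rest[:k]
--             out.append(''.join(r.lower() if (o.isupper() or o.isnumeric()) else r.upper()
--                                for r, o in zip(reversed(run), run)))
--             rest = rest[k:]
--         else:
--             out.append(rest[0])
--             rest = rest[1:]
--     return ''.join(out)
-- ===== Notes on version B (the rewrite author's own statement) =====
-- stated objective: simpler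
-- what changed: Replaces A's two-phase design (buffer-accumulating tokenizer building a words list, then a second indexed pass per word with enumerate and word[i] lookups) by a single run-at-a-time scan that peels each maximal alnum run off the front and transforms it with zip(reversed(run), run), appending separators directly.
import Mathlib
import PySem

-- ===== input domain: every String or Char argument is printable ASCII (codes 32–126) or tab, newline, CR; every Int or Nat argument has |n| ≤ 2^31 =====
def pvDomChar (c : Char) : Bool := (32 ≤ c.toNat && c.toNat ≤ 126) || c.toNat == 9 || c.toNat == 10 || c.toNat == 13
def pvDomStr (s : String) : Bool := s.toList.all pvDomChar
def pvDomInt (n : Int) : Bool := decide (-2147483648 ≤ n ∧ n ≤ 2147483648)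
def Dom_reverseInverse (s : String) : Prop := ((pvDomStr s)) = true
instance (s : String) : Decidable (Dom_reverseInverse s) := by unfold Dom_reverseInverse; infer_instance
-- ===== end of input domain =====

-- B replaces A's buffer-accumulating tokenizer (words list + current buffer + a second
-- indexed pass per word) by a single run-at-a-time recursion that transforms each maximal
-- alnum run via zip(reversed(run), run); objective: simpler, same cost.

-- ===== PORT A =====
-- 'c.isnumeric()' is ported as PySem.Chars.isdigit: on the printable-ASCII domain the two agree.
-- the tokenizer loop's state: (words, current)
def pvTokStep (st : List (List Char) × List Char) (c : Char) : List (List Char) × List Char :=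
  if !(PySem.Chars.isalnum c) then
    (if st.2.isEmpty then st.1 ++ [[c]] else st.1 ++ [st.2, [c]], [])
  else (st.1, st.2 ++ [c])

def pvWords (cs : List Char) : List (List Char) :=
  let st := cs.foldl pvTokStep ([], [])
  if st.2.isEmpty then st.1 else st.1 ++ [st.2]

-- 'word[::-1]' is list reversal; 'word[i]' with 0 ≤ i < len(word) is pyGetD with an unreachable default
def pvReverseWord (w : List Char) : List Char :=
  if w.length = 1 ∧ ¬ (PySem.Chars.strIsalnum w = true) then w
  else
    (PySem.List.enumerate w.reverse 0).foldl (fun out_rev ic =>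
      if PySem.Chars.isupper (PySem.List.pyGetD w ic.1 ' ') || PySem.Chars.isdigit (PySem.List.pyGetD w ic.1 ' ')
      then out_rev ++ [PySem.Chars.lowerChar ic.2]
      else out_rev ++ [PySem.Chars.upperChar ic.2]) []

def reverseInverse (s : String) : String :=
  String.ofList (((pvWords s.toList).map pvReverseWord).flatten)

-- ===== PORT B =====
-- ''.join(... for r, o in zip(reversed(run), run))
def pvTransform (run : List Char) : List Char :=
  (run.reverse.zip run).map (fun ro =>
    if PySem.Chars.isupper ro.2 || PySem.Chars.isdigit ro.2
    then PySem.Chars.lowerChar ro.1 else PySem.Chars.upperChar ro.1)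

-- the outer while loop of Source B, recursing on the remaining suffix 'rest';
-- the inner counting while loop is exactly takeWhile/dropWhile of the alnum predicate
def pvGo (cs : List Char) : List Char :=
  match cs with
  | [] => []
  | c :: t =>
    if h : PySem.Chars.isalnum c = true then
      pvTransform ((c :: t).takeWhile PySem.Chars.isalnum)
        ++ pvGo ((c :: t).dropWhile PySem.Chars.isalnum)
    else c :: pvGo t
termination_by cs.length
decreasing_by
  · simp only [List.dropWhile_cons, h, if_true]
    exact Nat.lt_succ_of_le (List.length_dropWhile_le _ _)
  · simp

def reverseInverse_alt (s : String) : String :=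
  String.ofList (pvGo s.toList)

-- ===== PRECONDITION & SPEC =====
def Spec_reverseInverse (s : String) (out : String) : Prop := out = reverseInverse_alt s
instance (s : String) (out : String) : Decidable (Spec_reverseInverse s out) := by unfold Spec_reverseInverse; infer_instance

-- ===== CLAIM (what is proved, stated in full; the proofs are below) =====
def Claim_equal_reverseInverse : Prop := ∀ (s : String), Dom_reverseInverse s → Spec_reverseInverse s (reverseInverse s)

-- ===== LEMMAS AND PROOFS =====

-- starting the tokenizer fold with words 'ws' just prefixes ws to the words produced from ([], cur)
theorem pvTok_shift (cs : List Char) : ∀ (ws : List (List Char)) (cur : List Char),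
    cs.foldl pvTokStep (ws, cur)
      = (ws ++ (cs.foldl pvTokStep ([], cur)).1, (cs.foldl pvTokStep ([], cur)).2) := by
  induction cs with
  | nil => simp
  | cons c t ih =>
    intro ws cur
    simp only [List.foldl_cons]
    by_cases h : PySem.Chars.isalnum c = true
    · rw [show pvTokStep (ws, cur) c = (ws, cur ++ [c]) from by simp [pvTokStep, h],
        show pvTokStep ([], cur) c = ([], cur ++ [c]) from by simp [pvTokStep, h],
        ih ws, ih []]
    · by_cases hc : cur.isEmpty
      · rw [show pvTokStep (ws, cur) c = (ws ++ [[c]], []) from by simp [pvTokStep, h, hc],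
          show pvTokStep ([], cur) c = ([[c]], []) from by simp [pvTokStep, h, hc],
          ih (ws ++ [[c]]), ih [[c]]]
        simp
      · rw [show pvTokStep (ws, cur) c = (ws ++ [cur, [c]], []) from by simp [pvTokStep, h, hc],
          show pvTokStep ([], cur) c = ([cur, [c]], []) from by simp [pvTokStep, h, hc],
          ih (ws ++ [cur, [c]]), ih [cur, [c]]]
        simp

-- A's word list on a string starting with a non-alnum separator
theorem pvWords_sep (c : Char) (t : List Char) (h : ¬ PySem.Chars.isalnum c = true) :
    pvWords (c :: t) = [c] :: pvWords t := by
  simp only [pvWords, List.foldl_cons,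
    show pvTokStep ([], []) c = ([[c]], []) from by simp [pvTokStep, h]]
  rw [pvTok_shift]
  split <;> simp

-- finalizing the fold from a nonempty buffer 'cur' yields 'cur ++ (maximal alnum prefix)' then the rest
theorem pvWords_run (t : List Char) : ∀ (cur : List Char), ¬ cur.isEmpty →
    (let st := t.foldl pvTokStep ([], cur); if st.2.isEmpty then st.1 else st.1 ++ [st.2])
      = (cur ++ t.takeWhile PySem.Chars.isalnum) :: pvWords (t.dropWhile PySem.Chars.isalnum) := by
  induction t with
  | nil => intro cur hc; simp [hc, pvWords]
  | cons d r ih =>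
    intro cur hc
    by_cases h : PySem.Chars.isalnum d = true
    · have := ih (cur ++ [d]) (by simp)
      simp only [List.foldl_cons,
        show pvTokStep ([], cur) d = ([], cur ++ [d]) from by simp [pvTokStep, h],
        List.takeWhile_cons, List.dropWhile_cons, h, if_true] at *
      simpa using this
    · have hb : PySem.Chars.isalnum d = false := by simpa using h
      simp only [List.foldl_cons,
        show pvTokStep ([], cur) d = ([cur, [d]], []) from by simp [pvTokStep, h, hc],
        List.takeWhile_cons, List.dropWhile_cons, hb, Bool.false_eq_true, if_false,
        List.append_nil]
      rw [pvTok_shift, pvWords_sep d r h]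
      simp only [pvWords]
      split <;> simp


-- A's word list on a string starting with an alnum char: the maximal run comes off first
theorem pvWords_alnum (c : Char) (t : List Char) (h : PySem.Chars.isalnum c = true) :
    pvWords (c :: t) = ((c :: t).takeWhile PySem.Chars.isalnum)
      :: pvWords ((c :: t).dropWhile PySem.Chars.isalnum) := by
  simp only [pvWords, List.foldl_cons,
    show pvTokStep ([], []) c = ([], [c]) from by simp [pvTokStep, h],
    List.takeWhile_cons, List.dropWhile_cons, h, if_true]
  exact pvWords_run t [c] (by simp)

-- A leaves a single non-alnum separator unchanged
theorem pvReverseWord_sep (c : Char) (h : ¬ PySem.Chars.isalnum c = true) :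
    pvReverseWord [c] = [c] := by
  simp [pvReverseWord, PySem.Chars.strIsalnum, h]

-- on a nonempty all-alnum run, A's indexed second pass equals B's zip-map
theorem pvReverseWord_run (w : List Char) (hne : w ≠ [])
    (hall : ∀ c ∈ w, PySem.Chars.isalnum c = true) :
    pvReverseWord w = pvTransform w := by
  have hs : PySem.Chars.strIsalnum w = true := by
    simp [PySem.Chars.strIsalnum, hne, List.all_eq_true.2 hall]
  rw [pvReverseWord, if_neg (by simp [hs])]
  have hbody : (fun (out_rev : List Char) (ic : Int × Char) =>
      if PySem.Chars.isupper (PySem.List.pyGetD w ic.1 ' ') || PySem.Chars.isdigit (PySem.List.pyGetD w ic.1 ' ')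
      then out_rev ++ [PySem.Chars.lowerChar ic.2]
      else out_rev ++ [PySem.Chars.upperChar ic.2])
      = (fun out_rev ic => out_rev ++
          [if PySem.Chars.isupper (PySem.List.pyGetD w ic.1 ' ') || PySem.Chars.isdigit (PySem.List.pyGetD w ic.1 ' ')
           then PySem.Chars.lowerChar ic.2 else PySem.Chars.upperChar ic.2]) := by
    funext out_rev ic; split <;> rfl
  rw [hbody, PySem.List.foldl_append_singleton_eq_map, List.nil_append, pvTransform]
  apply List.ext_getElem
  · simp [PySem.List.length_enumerate]
  · intro k h1 h2
    have hk : k < w.length := by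
      simpa [PySem.List.length_enumerate] using h1
    rw [List.getElem_map, List.getElem_map, PySem.List.getElem_enumerate, List.getElem_zip]
    simp only [zero_add]
    rw [PySem.List.pyGetD_eq_getElem w ' ' (by positivity) (by exact_mod_cast hk)]
    simp

-- main equivalence on the character lists
theorem pvMain (cs : List Char) : ((pvWords cs).map pvReverseWord).flatten = pvGo cs := by
  induction cs using pvGo.induct with
  | case1 => simp [pvWords, pvGo]
  | case2 c t h ih =>
    rw [pvGo, dif_pos h, pvWords_alnum c t h, List.map_cons, List.flatten_cons, ih]
    congr 1
    exact pvReverseWord_run _ (by simp [h])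
      (fun x hx => List.mem_takeWhile_imp hx)
  | case3 c t h ih =>
    rw [pvGo, dif_neg h, pvWords_sep c t h, List.map_cons, List.flatten_cons,
      pvReverseWord_sep c h, ih]
    rfl

-- ===== VERDICT (by name: the statement is the Claim_ definition above) =====
theorem reverseInverse_spec : Claim_equal_reverseInverse := by
  intro s _
  show reverseInverse s = reverseInverse_alt s
  unfold reverseInverse reverseInverse_alt
  rw [pvMain]
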